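-- pv_equiv track=rewrite | github.com/smeruelo/coding-challenges | codechef/WICP1901/saviours/saviours.py | feeded
-- ===== SOURCE A (Python) =====
-- def feeded(drop):
--     feedable = 0
--     for char in drop:
--         if char == '*':
--             feedable = 2
--         elif feedable > 0:
--             feedable -= 1
--         else:
--             return 'NO'
--     return 'YES'
-- ===== SOURCE B (Python) =====
-- def feeded(drop):
--     segments = drop.split('*')
--     if segments[0] != '':
--         return 'NO'
--     return 'YES' if all(len(s) <= 2 for s in segments[1:]) else 'NO'
-- ===== Notes on version B (the rewrite author's own statement) =====
-- stated objective: idiomatic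
-- what changed: Replaced the character-by-character decrementing counter with split('*'): the string is cut at every star and the answer is read off the inter-star segment lengths (first segment empty, every later segment at most 2 chars).
import Mathlib
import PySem

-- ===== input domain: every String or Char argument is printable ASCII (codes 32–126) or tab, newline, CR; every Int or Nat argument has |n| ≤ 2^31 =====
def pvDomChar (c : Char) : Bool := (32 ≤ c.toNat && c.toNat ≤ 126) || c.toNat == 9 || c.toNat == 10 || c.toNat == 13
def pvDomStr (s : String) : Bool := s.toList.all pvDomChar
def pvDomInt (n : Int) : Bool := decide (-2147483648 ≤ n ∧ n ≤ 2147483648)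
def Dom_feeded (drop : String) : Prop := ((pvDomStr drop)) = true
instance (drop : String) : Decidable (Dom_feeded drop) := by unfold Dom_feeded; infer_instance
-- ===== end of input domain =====

-- B replaces A's decrementing per-character counter by splitting the string at every '*'
-- and checking the segment lengths (idiomatic, same cost).

-- ===== PORT A =====
-- the for-loop of A: the counter `feedable` is the Int state
def feededGo : List Char → Int → String
  | [], _ => "YES"
  | c :: cs, feedable =>
      if c = '*' then feededGo cs 2
      else if feedable > 0 then feededGo cs (feedable - 1)
      else "NO"

def feeded (drop : String) : String := feededGo drop.toList 0

-- ===== PORT B =====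
def feeded_alt (drop : String) : String :=
  let segments := PySem.Chars.splitOn drop.toList ['*']
  if segments.headD [] ≠ [] then "NO"
  else if (segments.drop 1).all (fun s => s.length ≤ 2) then "YES" else "NO"

-- ===== PRECONDITION & SPEC =====
def Spec_feeded (drop : String) (out : String) : Prop := out = feeded_alt drop
instance (drop : String) (out : String) : Decidable (Spec_feeded drop out) := by unfold Spec_feeded; infer_instance

-- ===== CLAIM (what is proved, stated in full; the proofs are below) =====
def Claim_equal_feeded : Prop := ∀ (drop : String), Dom_feeded drop → Spec_feeded drop (feeded drop)

-- ===== LEMMAS AND PROOFS =====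

-- reference splitter: split a char list at every '*'
def mySplit : List Char → List (List Char)
  | [] => [[]]
  | c :: cs => if c = '*' then [] :: mySplit cs else (mySplit cs).modifyHead (c :: ·)

theorem mySplit_ne_nil (cs : List Char) : mySplit cs ≠ [] := by
  cases cs with
  | nil => simp [mySplit]
  | cons c cs =>
      simp only [mySplit]
      split
      · simp
      · cases h : mySplit cs with
        | nil => exact absurd h (mySplit_ne_nil cs)
        | cons a t => simp [List.modifyHead]

theorem splitOn_go_star (l : List Char) : ∀ (fuel : Nat) (cur : List Char) (acc : List (List Char)),
    l.length ≤ fuel →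
    PySem.Chars.splitOn.go ['*'] fuel l cur acc
      = acc.reverse ++ (mySplit l).modifyHead (cur.reverse ++ ·) := by
  induction l with
  | nil =>
      intro fuel cur acc _
      cases fuel <;> simp [PySem.Chars.splitOn.go, mySplit, List.modifyHead]
  | cons c rest ih =>
      intro fuel cur acc hf
      cases fuel with
      | zero => simp at hf
      | succ fuel =>
          by_cases hc : c = '*'
          · subst hc
            rw [show PySem.Chars.splitOn.go ['*'] (fuel+1) ('*' :: rest) cur acc
                  = PySem.Chars.splitOn.go ['*'] fuel rest [] (cur.reverse :: acc) by
                  simp [PySem.Chars.splitOn.go, List.isPrefixOf]]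
            rw [ih fuel [] (cur.reverse :: acc) (by simpa using Nat.lt_succ_iff.mp (by simpa using hf))]
            cases h : mySplit rest with
            | nil => exact absurd h (mySplit_ne_nil rest)
            | cons a t => simp [mySplit, List.modifyHead, h]
          · rw [show PySem.Chars.splitOn.go ['*'] (fuel+1) (c :: rest) cur acc
                  = PySem.Chars.splitOn.go ['*'] fuel rest (c :: cur) acc by
                  simp only [PySem.Chars.splitOn.go, List.isPrefixOf]
                  rw [if_neg (by simp [Ne.symm hc])]]
            rw [ih fuel (c :: cur) acc (by simpa using Nat.lt_succ_iff.mp (by simpa using hf))]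
            cases h : mySplit rest with
            | nil => exact absurd h (mySplit_ne_nil rest)
            | cons a t => simp [mySplit, hc, List.modifyHead, h]

theorem splitOn_star (cs : List Char) : PySem.Chars.splitOn cs ['*'] = mySplit cs := by
  rw [PySem.Chars.splitOn, splitOn_go_star cs (cs.length + 1) [] [] (Nat.le_succ _)]
  cases h : mySplit cs with
  | nil => exact absurd h (mySplit_ne_nil cs)
  | cons a t => simp [List.modifyHead]

theorem feededGo_eq (cs : List Char) : ∀ (k : Int), 0 ≤ k →
    feededGo cs k =
      if (((mySplit cs).headD []).length : Int) ≤ k ∧ ((mySplit cs).drop 1).all (fun s => s.length ≤ 2) = true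
      then "YES" else "NO" := by
  induction cs with
  | nil =>
      intro k hk
      simp only [feededGo, mySplit]
      rw [if_pos ⟨by simpa using hk, by simp⟩]
  | cons c rest ih =>
      intro k hk
      by_cases hc : c = '*'
      · subst hc
        have hm : mySplit ('*' :: rest) = [] :: mySplit rest := by simp [mySplit]
        have hgo : feededGo ('*' :: rest) k = feededGo rest 2 := by simp [feededGo]
        rw [hgo, hm, ih 2 (by norm_num)]
        cases h : mySplit rest with
        | nil => exact absurd h (mySplit_ne_nil rest)
        | cons a t =>
            refine if_congr ?_ rfl rfl
            simp only [List.headD_cons, List.drop_one, List.tail_cons, List.all_cons,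
              Bool.and_eq_true, List.length_nil, Nat.cast_zero, decide_eq_true_eq]
            constructor
            · rintro ⟨h1, h2⟩; exact ⟨hk, by exact_mod_cast h1, h2⟩
            · rintro ⟨_, h1, h2⟩; exact ⟨by exact_mod_cast h1, h2⟩
      · have hm : mySplit (c :: rest) = (mySplit rest).modifyHead (c :: ·) := by
          simp [mySplit, hc]
        have hgo : feededGo (c :: rest) k = if k > 0 then feededGo rest (k - 1) else "NO" := by
          simp [feededGo, hc]
        rw [hgo, hm]
        cases h : mySplit rest with
        | nil => exact absurd h (mySplit_ne_nil rest)
        | cons a t =>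
            simp only [List.modifyHead]
            by_cases hkpos : k > 0
            · rw [if_pos hkpos, ih (k - 1) (by omega), h]
              refine if_congr ?_ rfl rfl
              simp only [List.headD_cons, List.drop_one, List.tail_cons, List.length_cons]
              constructor
              · rintro ⟨h1, h2⟩; exact ⟨by push_cast at h1 ⊢; omega, h2⟩
              · rintro ⟨h1, h2⟩; exact ⟨by push_cast at h1 ⊢; omega, h2⟩
            · rw [if_neg hkpos, if_neg]
              rintro ⟨h1, _⟩
              simp only [List.headD_cons, List.length_cons] at h1
              push_cast at h1
              omega

-- ===== VERDICT (by name: the statement is the Claim_ definition above) =====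
theorem feeded_spec : Claim_equal_feeded := by
  intro drop _
  unfold Spec_feeded feeded feeded_alt
  rw [splitOn_star, feededGo_eq drop.toList 0 le_rfl]
  cases h : mySplit drop.toList with
  | nil => exact absurd h (mySplit_ne_nil drop.toList)
  | cons a t =>
      simp only [List.headD_cons, ne_eq]
      by_cases ha : a = []
      · subst ha
        simp
      · have hlen : ¬ ((a.length : Int) ≤ 0) := by
          have := List.length_pos_of_ne_nil ha
          omega
        simp [ha, hlen]
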